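-- pv_equiv track=rewrite | github.com/panthistle/popmesh | ops.py | index_list
-- ===== SOURCE A (Python) =====
-- def index_list(flag, base, inc, beg, stp, loop):
--     if not flag:
--         return [base] * loop
--     beg = min(loop, beg)
--     ids = [base] * beg
--     if loop > beg:
--         d = loop - beg
--         base += inc
--         ct = 0
--         for i in range(d):
--             ids.append(base)
--             ct += 1
--             if ct == stp:
--                 base += inc
--                 ct = 0
--     return ids
-- ===== SOURCE B (Python) =====
-- def index_list(flag, base, inc, beg, stp, loop):
--     if not flag:
--         return [base] * loop
--     b = min(loop, beg)
--     # closed-form per position: past the 'beg' prefix, position j (0-based in the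
--     # tail) has advanced 1 + j//stp increments; a non-positive stp never advances.
--     return [base] * b + [base + inc * (1 + (j // stp if stp > 0 else 0))
--                          for j in range(loop - b)]
-- ===== Notes on version B (the rewrite author's own statement) =====
-- stated objective: simpler
-- what changed: Replaces the stateful append loop with its counter/base accumulators by a single comprehension that computes each element directly from its index with a closed-form j//stp chunk count (non-positive stp, where A's counter never fires, emits base+inc throughout the tail).
import Mathlib
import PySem

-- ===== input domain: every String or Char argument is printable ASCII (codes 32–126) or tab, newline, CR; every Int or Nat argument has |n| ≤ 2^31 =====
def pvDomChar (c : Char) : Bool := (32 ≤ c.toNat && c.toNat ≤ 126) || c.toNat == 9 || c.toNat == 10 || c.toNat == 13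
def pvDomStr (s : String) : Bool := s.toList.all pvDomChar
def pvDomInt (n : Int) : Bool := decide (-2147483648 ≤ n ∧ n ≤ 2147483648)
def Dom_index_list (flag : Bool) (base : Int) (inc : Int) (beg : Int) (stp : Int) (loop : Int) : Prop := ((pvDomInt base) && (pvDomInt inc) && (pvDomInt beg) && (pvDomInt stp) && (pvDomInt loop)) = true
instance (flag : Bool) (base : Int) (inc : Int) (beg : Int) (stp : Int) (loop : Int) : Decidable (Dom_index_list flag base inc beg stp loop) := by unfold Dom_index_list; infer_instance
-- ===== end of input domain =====

-- B replaces A's stateful counter/accumulator loop by a per-index closed form (objective: simpler).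

-- ===== PORT A =====
-- loop body of A's for-loop: state (ids, base, ct)
def ilStep (inc stp : Int) (s : List Int × Int × Int) (_ : Nat) : List Int × Int × Int :=
  let ids := s.1 ++ [s.2.1]
  let ct := s.2.2 + 1
  if ct = stp then (ids, s.2.1 + inc, 0) else (ids, s.2.1, ct)

def index_list (flag : Bool) (base : Int) (inc : Int) (beg : Int) (stp : Int) (loop : Int) : List Int :=
  if flag = false then List.replicate loop.toNat base  -- [base]*loop; negative loop gives []
  else
    let beg1 := min loop beg
    let ids := List.replicate beg1.toNat base
    if beg1 < loop then
      ((List.range (loop - beg1).toNat).foldl (ilStep inc stp) (ids, base + inc, 0)).1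
    else ids

-- ===== PORT B =====
def index_list_alt (flag : Bool) (base : Int) (inc : Int) (beg : Int) (stp : Int) (loop : Int) : List Int :=
  if flag = false then List.replicate loop.toNat base
  else
    let b := min loop beg
    List.replicate b.toNat base ++
      (List.range (loop - b).toNat).map (fun (j : Nat) =>
        base + inc * (1 + (if 0 < stp then PySem.Int.floordiv (j : Int) stp else 0)))

-- ===== PRECONDITION & SPEC =====
def Spec_index_list (flag : Bool) (base : Int) (inc : Int) (beg : Int) (stp : Int) (loop : Int) (out : List Int) : Prop := out = index_list_alt flag base inc beg stp loop
instance (flag : Bool) (base : Int) (inc : Int) (beg : Int) (stp : Int) (loop : Int) (out : List Int) : Decidable (Spec_index_list flag base inc beg stp loop out) := by unfold Spec_index_list; infer_instance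

-- ===== CLAIM (what is proved, stated in full; the proofs are below) =====
def Claim_equal_index_list : Prop := ∀ (flag : Bool) (base : Int) (inc : Int) (beg : Int) (stp : Int) (loop : Int), Dom_index_list flag base inc beg stp loop → Spec_index_list flag base inc beg stp loop (index_list flag base inc beg stp loop)

-- ===== LEMMAS AND PROOFS =====

-- successor arithmetic for div/mod by a variable positive s (omega cannot do these)
lemma succ_dm_eq (s k : Nat) (hs1 : 1 ≤ s) (h : k % s + 1 = s) :
    (k + 1) / s = k / s + 1 ∧ (k + 1) % s = 0 := by
  have hk := Nat.div_add_mod k s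
  have hkk : k + 1 = s * (k / s + 1) := by rw [Nat.mul_succ]; omega
  constructor
  · rw [hkk, Nat.mul_div_cancel_left _ (by omega)]
  · rw [hkk]; exact Nat.mul_mod_right s _

lemma succ_dm_ne (s k : Nat) (hs1 : 1 ≤ s) (h : ¬ (k % s + 1 = s)) :
    (k + 1) / s = k / s ∧ (k + 1) % s = k % s + 1 := by
  have hk := Nat.div_add_mod k s
  have hlt : k % s < s := Nat.mod_lt _ (by omega)
  have hkk : k + 1 = s * (k / s) + (k % s + 1) := by omega
  have h1 : (k % s + 1) / s = 0 := Nat.div_eq_of_lt (by omega)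
  constructor
  · rw [hkk, Nat.mul_add_div (by omega), h1, Nat.add_zero]
  · rw [hkk, Nat.mul_add_mod, Nat.mod_eq_of_lt (by omega)]

-- loop invariant, positive step s: after k iterations ids carries the closed-form
-- prefix, the running base is base + inc*(1 + k/s) and the counter is k % s
lemma il_inv_pos (inc : Int) (s : Nat) (hs1 : 1 ≤ s) (base : Int) (ids0 : List Int) (k : Nat) :
    (List.range k).foldl (ilStep inc (s : Int)) (ids0, base + inc, 0) =
    (ids0 ++ (List.range k).map (fun j => base + inc * (1 + ((j / s : Nat) : Int))),
     base + inc * (1 + ((k / s : Nat) : Int)),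
     ((k % s : Nat) : Int)) := by
  induction k with
  | zero => simp
  | succ k ih =>
    rw [List.range_succ, List.foldl_append, ih]
    simp only [List.foldl_cons, List.foldl_nil, ilStep]
    by_cases h2 : k % s + 1 = s
    · obtain ⟨hd, hm⟩ := succ_dm_eq s k hs1 h2
      have hc : ((k % s : Nat) : Int) + 1 = (s : Int) := by push_cast; omega
      rw [if_pos hc]
      simp only [Prod.mk.injEq]
      refine ⟨?_, ?_, ?_⟩
      · simp
      · rw [hd]; push_cast; ring
      · rw [hm]; simp
    · obtain ⟨hd, hm⟩ := succ_dm_ne s k hs1 h2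
      have hc : ¬ (((k % s : Nat) : Int) + 1 = (s : Int)) := by push_cast; omega
      rw [if_neg hc]
      simp only [Prod.mk.injEq]
      refine ⟨?_, ?_, ?_⟩
      · simp
      · rw [hd]
      · rw [hm]; push_cast; ring

-- loop invariant, non-positive step: the counter (= k) never reaches stp, so the
-- running base stays base + inc
lemma il_inv_nonpos (inc stp : Int) (hs : stp ≤ 0) (base : Int) (ids0 : List Int) (k : Nat) :
    (List.range k).foldl (ilStep inc stp) (ids0, base + inc, 0) =
    (ids0 ++ (List.range k).map (fun _ => base + inc), base + inc, (k : Int)) := by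
  induction k with
  | zero => simp
  | succ k ih =>
    rw [List.range_succ, List.foldl_append, ih]
    have hc : ¬ ((k : Int) + 1 = stp) := by omega
    simp only [List.foldl_cons, List.foldl_nil, ilStep, if_neg hc]
    simp

-- ===== VERDICT (by name: the statement is the Claim_ definition above) =====
theorem index_list_spec : Claim_equal_index_list := by
  intro flag base inc beg stp loop _
  unfold Spec_index_list index_list index_list_alt
  cases flag with
  | false => simp
  | true =>
    simp only [Bool.true_eq_false, if_false]
    set b1 := min loop beg with hb1
    by_cases hlt : b1 < loop
    · simp only [hlt, if_true]
      by_cases hs : 0 < stp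
      · obtain ⟨s, hs1, rfl⟩ : ∃ s : Nat, 1 ≤ s ∧ stp = (s : Int) :=
          ⟨stp.toNat, by omega, (Int.toNat_of_nonneg hs.le).symm⟩
        rw [il_inv_pos inc s hs1 base _ _]
        simp only [List.append_cancel_left_eq]
        apply List.map_congr_left
        intro j _
        rw [if_pos hs, PySem.Int.floordiv_natCast]
      · rw [il_inv_nonpos inc stp (by omega) base _ _]
        simp only [List.append_cancel_left_eq]
        apply List.map_congr_left
        intro j _
        rw [if_neg hs]
        ring
    · have h0 : (loop - b1).toNat = 0 := by omega
      simp [hlt, h0]
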